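-- pv_equiv track=rewrite | github.com/necan/imooc-decrypter | crypto.py | f4
-- ===== SOURCE A (Python) =====
-- def f4(data, t):
--     data = list(data)
--     i = 0
--     while i < len(data):
--         r = data[i] % 5
--         if r % 5 and r != 1 and i + r < len(data):
--             data[i + 1], data[i + r] = data[i + r], data[i + 1]
--             n = i + 2
--             i = i + r + 1
--             while i - 2 > n:
--                 data[n] = data[n] ^ ord(t[n % len(t)])
--                 n += 1
--         i += 1
--
--     i = 0
--     while i < len(data):
--         data[i] = data[i] ^ ord(t[i % len(t)])
--         i += 1
--     return data
-- ===== SOURCE B (Python) =====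
-- def f4(data, t):
--     out = list(data)
--     n = len(out)
--     skip = set()
--     i = 0
--     while i < n:
--         r = data[i] % 5
--         if r != 0 and r != 1 and i + r < n:
--             out[i + 1], out[i + r] = out[i + r], out[i + 1]
--             skip.update(range(i + 2, i + r - 1))
--             i += r + 1
--         i += 1
--     return [v if k in skip else v ^ ord(t[k % len(t)]) for k, v in enumerate(out)]
-- ===== Notes on version B (the rewrite author's own statement) =====
-- stated objective: simpler
-- what changed: B drops A's redundant double-XOR: A XORs the inner index range in pass 1 and XORs every index again in pass 2 (so those indices are net-unchanged); B does one structural pass that only swaps and records the protected indices in a set, then XORs exactly the unprotected indices once in a comprehension.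
import Mathlib
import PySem

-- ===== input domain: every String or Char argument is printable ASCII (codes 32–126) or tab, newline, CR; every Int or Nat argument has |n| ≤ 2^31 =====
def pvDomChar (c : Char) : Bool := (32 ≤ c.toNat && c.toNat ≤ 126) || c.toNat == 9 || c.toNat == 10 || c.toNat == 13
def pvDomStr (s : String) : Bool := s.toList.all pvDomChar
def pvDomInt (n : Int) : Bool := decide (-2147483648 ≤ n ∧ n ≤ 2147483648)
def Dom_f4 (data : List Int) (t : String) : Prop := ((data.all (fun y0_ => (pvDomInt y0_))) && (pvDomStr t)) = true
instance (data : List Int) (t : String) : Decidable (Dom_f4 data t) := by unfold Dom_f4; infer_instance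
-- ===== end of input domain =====

-- B replaces A's double-XOR of the inner index range (once in pass 1, undone by pass 2)
-- by a skip set: pass 1 only swaps and records the protected indices, pass 2 XORs every
-- index not in the set, so each XOR is done at most once.  Objective: simpler.

-- ord(t[n % len(t)]) — exact for t ≠ [] (then n % len(t) is in range); the default is never
-- reached inside Pre_f4.  Shared by both ports (both Pythons compute this same expression).
def pvKey (t : List Char) (n : Nat) : Int := ((t.getD (n % t.length) ' ').toNat : Int)

-- ===== PORT A =====
-- inner `while i - 2 > n` loop of A's first pass (stop = i - 2 after i was set to i + r + 1);
-- index n is provably in range there, so `getD _ 0` is exact.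
def f4InnerA (t : List Char) (stop : Nat) (n : Nat) (d : List Int) : List Int :=
  if n < stop then
    f4InnerA t stop (n + 1) (d.set n (PySem.Int.bxor (d.getD n 0) (pvKey t n)))
  else d
termination_by stop - n

lemma f4InnerA_length (t : List Char) (stop : Nat) :
    ∀ (n : Nat) (d : List Int), (f4InnerA t stop n d).length = d.length := by
  intro n d
  induction n, d using f4InnerA.induct t stop with
  | case1 n d h ih => rw [f4InnerA, if_pos h]; simpa using ih
  | case2 n d h => rw [f4InnerA, if_neg h]

-- A's first `while i < len(data)` loop (swap + inner XOR loop, i jumps by r + 2 when it fires)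
def f4Pass1A (t : List Char) (i : Nat) (d : List Int) : List Int :=
  if _h : i < d.length then
    let r : Int := PySem.Int.mod (d.getD i 0) 5
    if PySem.Int.mod r 5 ≠ 0 ∧ r ≠ 1 ∧ (i : Int) + r < (d.length : Int) then
      -- data[i+1], data[i+r] = data[i+r], data[i+1]
      let d1 := (d.set (i + 1) (d.getD (i + r.toNat) 0)).set (i + r.toNat) (d.getD (i + 1) 0)
      -- n = i + 2; i = i + r + 1; inner loop runs while n < i - 2 = (old i) + r - 1; then i += 1
      f4Pass1A t (i + r.toNat + 2) (f4InnerA t (i + r.toNat - 1) (i + 2) d1)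
    else
      f4Pass1A t (i + 1) d
  else d
termination_by d.length - i
decreasing_by
  · simp only [f4InnerA_length, List.length_set]; omega
  · omega

-- A's second `while i < len(data)` loop: data[i] ^= ord(t[i % len(t)])
def f4Pass2A (t : List Char) (i : Nat) (d : List Int) : List Int :=
  if i < d.length then
    f4Pass2A t (i + 1) (d.set i (PySem.Int.bxor (d.getD i 0) (pvKey t i)))
  else d
termination_by d.length - i
decreasing_by simp only [List.length_set]; omega

def f4 (data : List Int) (t : String) : List Int :=
  f4Pass2A t.toList 0 (f4Pass1A t.toList 0 data)

-- ===== PORT B =====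
-- B's single structural pass: same swaps on the working copy `out`, anchors read from the
-- ORIGINAL `data`, protected indices collected in a set instead of being XORed.
def f4PassB (orig : List Int) (i : Nat) (d : List Int) (skip : PySem.Set Int) :
    List Int × PySem.Set Int :=
  if _h : i < d.length then
    let r : Int := PySem.Int.mod (orig.getD i 0) 5
    if r ≠ 0 ∧ r ≠ 1 ∧ (i : Int) + r < (d.length : Int) then
      let d1 := (d.set (i + 1) (d.getD (i + r.toNat) 0)).set (i + r.toNat) (d.getD (i + 1) 0)
      -- skip.update(range(i + 2, i + r - 1)); i += r + 1; i += 1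
      f4PassB orig (i + r.toNat + 2) d1
        (PySem.Set.update skip (PySem.List.pyRange ((i : Int) + 2) ((i : Int) + r - 1) 1))
    else
      f4PassB orig (i + 1) d skip
  else (d, skip)
termination_by d.length - i
decreasing_by
  · simp only [List.length_set]; omega
  · omega

def f4_alt (data : List Int) (t : String) : List Int :=
  let p := f4PassB data 0 data PySem.Set.empty
  -- [v if k in skip else v ^ ord(t[k % len(t)]) for k, v in enumerate(out)]
  (PySem.List.enumerate p.1 0).map (fun kv =>
    if PySem.Set.contains p.2 kv.1 then kv.2
    else PySem.Int.bxor kv.2 (pvKey t.toList (kv.1.toNat)))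

-- ===== PRECONDITION & SPEC =====
-- Pre_ excludes exactly the inputs where Python A raises: nonempty data with t = "" hits
-- `n % len(t)` → ZeroDivisionError (B raises there too).
def Pre_f4 (data : List Int) (t : String) : Prop := data = [] ∨ t.toList ≠ []
instance (data : List Int) (t : String) : Decidable (Pre_f4 data t) := by
  unfold Pre_f4; infer_instance

def pvWitness_f4 : List Int × String := ([3, 1, 2, 0, 9], "ab")

def Spec_f4 (data : List Int) (t : String) (out : List Int) : Prop := out = f4_alt data t
instance (data : List Int) (t : String) (out : List Int) : Decidable (Spec_f4 data t out) := by
  unfold Spec_f4; infer_instance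

-- ===== CLAIM (what is proved, stated in full; the proofs are below) =====
def Claim_equal_f4 : Prop :=
  ∀ (data : List Int) (t : String), Dom_f4 data t → Pre_f4 data t → Spec_f4 data t (f4 data t)

-- ===== LEMMAS AND PROOFS =====

-- XOR with the (nonnegative) key twice is the identity.
lemma pv_bxor_cancel (a k : Int) (hk : 0 ≤ k) :
    PySem.Int.bxor (PySem.Int.bxor a k) k = a := by
  unfold PySem.Int.bxor
  by_cases ha : 0 ≤ a
  · simp only [if_pos ha, if_pos hk]
    have h0 : (0 : Int) ≤ ↑(a.toNat ^^^ k.toNat) := by positivity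
    simp only [if_pos h0, Int.toNat_natCast, Nat.xor_xor_cancel_right]
    omega
  · simp only [if_neg ha, if_pos hk]
    have h0 : ¬ (0 : Int) ≤ -↑((-a - 1).toNat ^^^ k.toNat) - 1 := by
      have : (0 : Int) ≤ ↑((-a - 1).toNat ^^^ k.toNat) := by positivity
      omega
    simp only [if_neg h0]
    have h1 : (-(-(((-a - 1).toNat ^^^ k.toNat : Nat) : Int) - 1) - 1)
        = (((-a - 1).toNat ^^^ k.toNat : Nat) : Int) := by omega
    rw [h1]
    simp [Nat.xor_xor_cancel_right]
    omega

lemma pvKey_nonneg (t : List Char) (n : Nat) : 0 ≤ pvKey t n := by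
  unfold pvKey; positivity

lemma pvGetD_set (d : List Int) (k j : Nat) (v : Int) :
    (d.set k v).getD j 0 = if j = k ∧ k < d.length then v else d.getD j 0 := by
  simp only [List.getD_eq_getElem?_getD, List.getElem?_set]
  split_ifs with h1 h2 h3 <;> simp_all

-- what A's inner XOR loop does to each position
lemma f4InnerA_getD (t : List Char) (stop : Nat) :
    ∀ (n : Nat) (d : List Int) (j : Nat),
    (f4InnerA t stop n d).getD j 0 =
      if n ≤ j ∧ j < stop ∧ j < d.length then PySem.Int.bxor (d.getD j 0) (pvKey t j)
      else d.getD j 0 := by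
  intro n d j
  induction n, d using f4InnerA.induct t stop with
  | case1 n d h ih =>
    rw [f4InnerA, if_pos h, ih]
    simp only [List.length_set, pvGetD_set]
    split_ifs with h1 h2 h3 <;>
      first
      | rfl
      | (exfalso; omega)
      | (obtain ⟨rfl, -⟩ := ‹j = n ∧ n < d.length›; rfl)
  | case2 n d h =>
    rw [f4InnerA, if_neg h, if_neg (by omega)]

-- what A's second pass does to each position
lemma f4Pass2A_getD (t : List Char) :
    ∀ (m i : Nat) (d : List Int), d.length - i ≤ m →
    (f4Pass2A t i d).length = d.length ∧
    ∀ j : Nat, (f4Pass2A t i d).getD j 0 =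
      if i ≤ j ∧ j < d.length then PySem.Int.bxor (d.getD j 0) (pvKey t j) else d.getD j 0 := by
  intro m
  induction m with
  | zero =>
    intro i d h
    rw [f4Pass2A, if_neg (by omega)]
    exact ⟨rfl, fun j => by rw [if_neg (by omega)]⟩
  | succ m ih =>
    intro i d h
    by_cases hi : i < d.length
    · rw [f4Pass2A, if_pos hi]
      obtain ⟨hlen, hP⟩ := ih (i + 1) (d.set i (PySem.Int.bxor (d.getD i 0) (pvKey t i)))
        (by simp only [List.length_set]; omega)
      simp only [List.length_set] at hlen hP
      refine ⟨hlen, fun j => ?_⟩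
      rw [hP j, pvGetD_set]
      by_cases hj : j = i
      · subst hj
        rw [if_neg (by omega), if_pos ⟨rfl, hi⟩, if_pos ⟨le_refl _, hi⟩]
      · simp only [if_neg (show ¬(j = i ∧ i < d.length) from fun hc => hj hc.1)]
        split_ifs with h1 h2 <;> first | rfl | omega
    · rw [f4Pass2A, if_neg hi]
      exact ⟨rfl, fun j => by rw [if_neg (by omega)]⟩

-- MAIN INVARIANT: running A's first pass and B's pass from the same index i, where the
-- A-side list differs from the B-side list exactly by an XOR at the indices already in
-- `skip`, and both still agree with `orig` from i on, keeps that correspondence.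
lemma f4_pass_rel (t : List Char) (orig : List Int) :
    ∀ (m i : Nat) (dA dB : List Int) (skip : PySem.Set Int),
    dB.length - i ≤ m →
    dA.length = dB.length →
    (∀ j : Nat, i ≤ j → dA.getD j 0 = orig.getD j 0) →
    (∀ j : Nat, i ≤ j → dB.getD j 0 = orig.getD j 0) →
    (∀ x ∈ skip, x < (i : Int)) →
    (∀ j : Nat, dA.getD j 0 =
      if (j : Int) ∈ skip then PySem.Int.bxor (dB.getD j 0) (pvKey t j) else dB.getD j 0) →
    (f4Pass1A t i dA).length = (f4PassB orig i dB skip).1.length ∧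
    ∀ j : Nat, (f4Pass1A t i dA).getD j 0 =
      if (j : Int) ∈ (f4PassB orig i dB skip).2 then
        PySem.Int.bxor ((f4PassB orig i dB skip).1.getD j 0) (pvKey t j)
      else (f4PassB orig i dB skip).1.getD j 0 := by
  intro m
  induction m with
  | zero =>
    intro i dA dB skip hm hlen hA hB hsk hrel
    rw [f4Pass1A, dif_neg (by omega), f4PassB, dif_neg (by omega)]
    exact ⟨hlen, hrel⟩
  | succ m ih =>
    intro i dA dB skip hm hlen hA hB hsk hrel
    by_cases hiB : i < dB.length
    · have hiA : i < dA.length := by omega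
      have hAi : dA.getD i 0 = orig.getD i 0 := hA i (le_refl i)
      rw [f4Pass1A, dif_pos hiA, f4PassB, dif_pos hiB]
      simp only [hAi, (show ((dA.length : Int)) = ((dB.length : Int)) from by rw [hlen])]
      have hr0 : 0 ≤ PySem.Int.mod (orig.getD i 0) 5 := PySem.Int.mod_nonneg _ (by norm_num)
      have hr5 : PySem.Int.mod (orig.getD i 0) 5 < 5 := PySem.Int.mod_lt _ (by norm_num)
      have hrr : PySem.Int.mod (PySem.Int.mod (orig.getD i 0) 5) 5
          = PySem.Int.mod (orig.getD i 0) 5 := by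
        rw [PySem.Int.mod_eq_emod_of_pos (by norm_num), Int.emod_eq_of_lt hr0 hr5]
      rw [hrr]
      by_cases hc : PySem.Int.mod (orig.getD i 0) 5 ≠ 0 ∧ PySem.Int.mod (orig.getD i 0) 5 ≠ 1 ∧
          (i : Int) + PySem.Int.mod (orig.getD i 0) 5 < (dB.length : Int)
      · rw [if_pos hc, if_pos hc]
        -- r ∈ {2, 3, 4}
        obtain ⟨hc0, hc1, hcb⟩ := hc
        set r : Int := PySem.Int.mod (orig.getD i 0) 5 with hrdef
        set rn : Nat := r.toNat with hrndef
        have hrI : (rn : Int) = r := Int.toNat_of_nonneg hr0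
        have hrn2 : 2 ≤ rn := by omega
        have hrn4 : rn ≤ 4 := by omega
        have hbound : i + rn < dB.length := by omega
        -- the two swapped lists
        set d1A : List Int :=
          (dA.set (i + 1) (dA.getD (i + rn) 0)).set (i + rn) (dA.getD (i + 1) 0) with hd1A
        set d1B : List Int :=
          (dB.set (i + 1) (dB.getD (i + rn) 0)).set (i + rn) (dB.getD (i + 1) 0) with hd1B
        have hlen1A : d1A.length = dA.length := by simp [hd1A]
        have hlen1B : d1B.length = dB.length := by simp [hd1B]
        have hget1A : ∀ j : Nat, d1A.getD j 0 =
            if j = i + rn then dA.getD (i + 1) 0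
            else if j = i + 1 then dA.getD (i + rn) 0 else dA.getD j 0 := by
          intro j
          rw [hd1A]
          simp only [pvGetD_set, List.length_set]
          split_ifs <;> first | rfl | omega
        have hget1B : ∀ j : Nat, d1B.getD j 0 =
            if j = i + rn then dB.getD (i + 1) 0
            else if j = i + 1 then dB.getD (i + rn) 0 else dB.getD j 0 := by
          intro j
          rw [hd1B]
          simp only [pvGetD_set, List.length_set]
          split_ifs <;> first | rfl | omega
        have hnotsk : ∀ j : Nat, i ≤ j → ¬ ((j : Int) ∈ skip) := by
          intro j hj hmem
          have := hsk _ hmem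
          omega
        -- the swap keeps the skip-correspondence and the agreement with orig beyond i+rn
        have hswap : ∀ j : Nat, d1A.getD j 0 =
            if (j : Int) ∈ skip then PySem.Int.bxor (d1B.getD j 0) (pvKey t j)
            else d1B.getD j 0 := by
          intro j
          rw [hget1A, hget1B]
          by_cases hj1 : j = i + rn
          · subst hj1
            rw [if_pos rfl, if_pos rfl, if_neg (hnotsk _ (by omega))]
            rw [hA _ (by omega), hB _ (by omega)]
          · by_cases hj2 : j = i + 1
            · subst hj2
              rw [if_neg hj1, if_neg hj1, if_pos rfl, if_pos rfl,
                if_neg (hnotsk _ (by omega))]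
              rw [hA _ (by omega), hB _ (by omega)]
            · rw [if_neg hj1, if_neg hj1, if_neg hj2, if_neg hj2]
              exact hrel j
        set d2A : List Int := f4InnerA t (i + rn - 1) (i + 2) d1A with hd2A
        set skip' : PySem.Set Int :=
          PySem.Set.update skip (PySem.List.pyRange ((i : Int) + 2) ((i : Int) + r - 1) 1)
          with hskip'
        have hmem' : ∀ x : Int, x ∈ skip' ↔ x ∈ skip ∨ ((i : Int) + 2 ≤ x ∧ x < (i : Int) + r - 1) := by
          intro x
          rw [hskip', PySem.Set.mem_update, PySem.List.mem_pyRange_one]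
        have hlen2A : d2A.length = d1A.length := f4InnerA_length t _ _ _
        -- apply the induction hypothesis at i + rn + 2
        refine ih (i + rn + 2) d2A d1B skip' (by omega) (by omega) ?_ ?_ ?_ ?_
        · intro j hj
          rw [hd2A, f4InnerA_getD, if_neg (by omega), hget1A,
            if_neg (by omega), if_neg (by omega)]
          exact hA j (by omega)
        · intro j hj
          rw [hget1B, if_neg (by omega), if_neg (by omega)]
          exact hB j (by omega)
        · intro x hx
          rcases (hmem' x).mp hx with h | h
          · have := hsk x h; omega
          · omega
        · intro j
          rw [hd2A, f4InnerA_getD]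
          by_cases hin : i + 2 ≤ j ∧ j < i + rn - 1
          · have hjlen : j < d1A.length := by omega
            rw [if_pos ⟨hin.1, hin.2, hjlen⟩]
            have hjne : d1A.getD j 0 = d1B.getD j 0 := by
              rw [hswap j, if_neg (hnotsk _ (by omega))]
            rw [hjne, if_pos ((hmem' _).mpr (Or.inr (by omega)))]
          · rw [if_neg (by omega)]
            have : ((j : Int) ∈ skip') ↔ ((j : Int) ∈ skip) := by
              rw [hmem']
              constructor
              · rintro (h | h)
                · exact h
                · exfalso; omega
              · exact Or.inl
            by_cases hj : (j : Int) ∈ skip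
            · rw [if_pos (this.mpr hj), hswap j, if_pos hj]
            · rw [if_neg (fun hx => hj (this.mp hx)), hswap j, if_neg hj]
      · rw [if_neg hc, if_neg hc]
        refine ih (i + 1) dA dB skip (by omega) hlen
          (fun j hj => hA j (by omega)) (fun j hj => hB j (by omega))
          (fun x hx => by have := hsk x hx; omega) hrel
    · rw [f4Pass1A, dif_neg (by omega), f4PassB, dif_neg hiB]
      exact ⟨hlen, hrel⟩

-- ===== VERDICT (by name: the statement is the Claim_ definition above) =====
theorem f4_spec : Claim_equal_f4 := by
  intro data t _hdom _hpre
  unfold Spec_f4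
  simp only [f4, f4_alt]
  obtain ⟨hlen, hrel⟩ := f4_pass_rel t.toList data data.length 0 data data PySem.Set.empty
    (by omega) rfl (fun j _ => rfl) (fun j _ => rfl)
    (fun x hx => by simp [PySem.Set.empty] at hx)
    (fun j => by rw [if_neg (by simp [PySem.Set.empty])])
  obtain ⟨hlen2, hP2⟩ := f4Pass2A_getD t.toList (f4Pass1A t.toList 0 data).length 0
    (f4Pass1A t.toList 0 data) (by omega)
  apply List.ext_getElem
  · simp only [hlen2, hlen, List.length_map, PySem.List.length_enumerate]
  · intro k h1 h2
    have hkA : k < (f4Pass1A t.toList 0 data).length := by omega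
    have hkB : k < (f4PassB data 0 data PySem.Set.empty).1.length := by omega
    rw [List.getElem_map, PySem.List.getElem_enumerate]
    simp only [zero_add, Int.toNat_natCast]
    rw [← List.getD_eq_getElem (f4PassB data 0 data PySem.Set.empty).1 0 hkB]
    rw [← List.getD_eq_getElem _ 0 h1, hP2 k, if_pos ⟨Nat.zero_le k, hkA⟩, hrel k]
    by_cases hmem : (k : Int) ∈ (f4PassB data 0 data PySem.Set.empty).2
    · rw [if_pos hmem, if_pos ((PySem.Set.contains_iff _ _).mpr hmem),
        pv_bxor_cancel _ _ (pvKey_nonneg _ _)]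
    · rw [if_neg hmem, if_neg (fun h => hmem ((PySem.Set.contains_iff _ _).mp h))]
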